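-- pv_equiv track=rewrite | github.com/FanchenBao/leetcode | LeetCode_2549.py | distinctIntegers
-- ===== SOURCE A (Python) =====
-- def distinctIntegers(n: int) -> int:
--     """This feels wrong. It does pass, but I feel like there should be a
--     math solution.
--
--     O(N^2), 50 ms, faster than 18.97%
--     """
--     queue = [n]
--     seen = set([n])
--     res = 0
--     while queue:
--         res += len(queue)
--         tmp = []
--         for x in queue:
--             for i in range(2, x):
--                 if x % i == 1 and i not in seen:
--                     tmp.append(i)
--                     seen.add(i)
--         queue = tmp
--     return res
-- ===== SOURCE B (Python) =====
-- def distinctIntegers(n: int) -> int: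
--     # Closed form: the board eventually holds every integer from 2 through n
--     # (when the start exceeds two), otherwise just the starting number itself.
--     return max(n - 1, 1)
-- ===== Notes on version B (the rewrite author's own statement) =====
-- stated objective: faster
-- what changed: Replaces the BFS over reachable board values with the closed form max(n-1, 1): the reachable set is exactly the integers from 2 through n when the start exceeds two, and only the starting number otherwise.
import Mathlib
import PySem

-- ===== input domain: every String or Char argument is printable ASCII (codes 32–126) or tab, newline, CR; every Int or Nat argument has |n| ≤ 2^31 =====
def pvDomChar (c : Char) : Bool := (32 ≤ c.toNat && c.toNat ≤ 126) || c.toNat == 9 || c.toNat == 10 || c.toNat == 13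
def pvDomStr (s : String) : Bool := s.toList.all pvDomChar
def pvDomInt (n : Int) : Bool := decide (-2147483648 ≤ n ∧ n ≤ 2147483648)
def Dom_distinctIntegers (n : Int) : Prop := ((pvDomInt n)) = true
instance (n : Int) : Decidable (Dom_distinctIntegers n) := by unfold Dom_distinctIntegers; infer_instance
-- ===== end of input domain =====

-- B replaces A's BFS over reachable board values with the closed form max(n-1, 1): faster (O(1) vs A's nested loops).

-- ===== PORT A =====
-- inner 'for i in range(2, x)' body: state is (tmp, seen)
def pvInnerStep (x : Int) (st : List Int × PySem.Set Int) (i : Int) : List Int × PySem.Set Int :=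
  if PySem.Int.mod x i = 1 ∧ ¬ (PySem.Set.contains st.2 i = true) then
    (st.1 ++ [i], PySem.Set.add st.2 i)
  else st

-- one iteration of the while loop: 'tmp = []; for x in queue: for i in range(2, x): …'
def pvLevel (queue : List Int) (seen : PySem.Set Int) : List Int × PySem.Set Int :=
  queue.foldl (fun st x => (PySem.List.pyRange 2 x 1).foldl (pvInnerStep x) st) ([], seen)

-- 'while queue:' as fuel recursion; the fuel n.toNat + 2 is proved sufficient below (pvWhile_inv)
def pvWhile : Nat → List Int → PySem.Set Int → Int → Int
  | 0, _, _, res => res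
  | fuel+1, queue, seen, res =>
    if queue.isEmpty then res
    else
      let p := pvLevel queue seen
      pvWhile fuel p.1 p.2 (res + (queue.length : Int))

def distinctIntegers (n : Int) : Int :=
  pvWhile (n.toNat + 2) [n] (PySem.Set.ofList [n]) 0

-- ===== PORT B =====
def distinctIntegers_alt (n : Int) : Int := max (n - 1) 1

-- ===== PRECONDITION & SPEC =====
def Spec_distinctIntegers (n : Int) (out : Int) : Prop := out = distinctIntegers_alt n
instance (n : Int) (out : Int) : Decidable (Spec_distinctIntegers n out) := by unfold Spec_distinctIntegers; infer_instance

-- ===== CLAIM (what is proved, stated in full; the proofs are below) =====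
def Claim_equal_distinctIntegers : Prop := ∀ (n : Int), Dom_distinctIntegers n → Spec_distinctIntegers n (distinctIntegers n)

-- ===== LEMMAS AND PROOFS =====

-- seen-component of the inner-loop step (tmp is recovered from it: pair_shape below)
def sStep (x : Int) (s : List Int) (i : Int) : List Int :=
  if PySem.Int.mod x i = 1 ∧ ¬ (PySem.Set.contains s i = true) then s ++ [i] else s

def sInner (x : Int) (s : List Int) : List Int := (PySem.List.pyRange 2 x 1).foldl (sStep x) s

def sLevel (q : List Int) (s : List Int) : List Int := q.foldl (fun s x => sInner x s) s

lemma prefix_foldl_sStep (x : Int) : ∀ (is : List Int) (s : List Int), s <+: is.foldl (sStep x) s := by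
  intro is
  induction is with
  | nil => intro s; exact List.prefix_rfl
  | cons i is ih =>
    intro s
    refine List.IsPrefix.trans ?_ (ih (sStep x s i))
    unfold sStep; split
    · exact ⟨[i], rfl⟩
    · exact List.prefix_rfl

lemma prefix_sLevel : ∀ (q : List Int) (s : List Int), s <+: sLevel q s := by
  intro q
  induction q with
  | nil => intro s; exact List.prefix_rfl
  | cons x q ih =>
    intro s
    exact List.IsPrefix.trans (prefix_foldl_sStep x _ s) (ih (sInner x s))

lemma pair_shape (x : Int) : ∀ (is : List Int) (t s : List Int),
    is.foldl (pvInnerStep x) (t, s) =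
      (t ++ (is.foldl (sStep x) s).drop s.length, is.foldl (sStep x) s) := by
  intro is
  induction is with
  | nil => intro t s; simp
  | cons i is ih =>
    intro t s
    simp only [List.foldl_cons]
    by_cases hc : PySem.Int.mod x i = 1 ∧ ¬ (PySem.Set.contains s i = true)
    · have hadd : PySem.Set.add s i = s ++ [i] := by
        unfold PySem.Set.add
        rw [if_neg hc.2]
      have hstep : pvInnerStep x (t, s) i = (t ++ [i], s ++ [i]) := by
        unfold pvInnerStep
        rw [if_pos hc, hadd]
      have hsstep : sStep x s i = s ++ [i] := by unfold sStep; rw [if_pos hc]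
      rw [hstep, hsstep, ih]
      obtain ⟨u, hu⟩ := prefix_foldl_sStep x is (s ++ [i])
      rw [← hu]
      have e1 : List.drop (s ++ [i]).length (s ++ [i] ++ u) = u := List.drop_left
      have e2 : List.drop s.length (s ++ [i] ++ u) = [i] ++ u := by
        rw [List.append_assoc]; exact List.drop_left
      rw [e1, e2]
      simp
    · have hstep : pvInnerStep x (t, s) i = (t, s) := by
        unfold pvInnerStep; rw [if_neg hc]
      have hsstep : sStep x s i = s := by unfold sStep; rw [if_neg hc]
      rw [hstep, hsstep, ih]

lemma level_shape : ∀ (q : List Int) (t s : List Int),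
    q.foldl (fun st x => (PySem.List.pyRange 2 x 1).foldl (pvInnerStep x) st) (t, s) =
      (t ++ (sLevel q s).drop s.length, sLevel q s) := by
  intro q
  induction q with
  | nil => intro t s; simp [sLevel]
  | cons x q ih =>
    intro t s
    simp only [List.foldl_cons]
    rw [pair_shape, ih]
    have h1 : s <+: sInner x s := prefix_foldl_sStep x _ s
    have h2 : sInner x s <+: sLevel q (sInner x s) := prefix_sLevel q _
    obtain ⟨u1, hu1⟩ := h1
    obtain ⟨u2, hu2⟩ := h2
    have hL : sLevel (x :: q) s = sLevel q (sInner x s) := by simp [sLevel, sInner]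
    have hs : sInner x s = List.foldl (sStep x) s (PySem.List.pyRange 2 x 1) := rfl
    rw [hL, ← hs, ← hu2, ← hu1]
    have e1 : List.drop s.length (s ++ u1) = u1 := List.drop_left
    have e2 : List.drop (s ++ u1).length (s ++ u1 ++ u2) = u2 := List.drop_left
    have e3 : List.drop s.length (s ++ u1 ++ u2) = u1 ++ u2 := by
      rw [List.append_assoc]; exact List.drop_left
    rw [e1, e2, e3]
    simp

lemma pvLevel_shape (q s : List Int) :
    pvLevel q s = ((sLevel q s).drop s.length, sLevel q s) := by
  unfold pvLevel
  exact level_shape q [] s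

lemma nodup_foldl_sStep (x : Int) : ∀ (is : List Int) (s : List Int),
    s.Nodup → (is.foldl (sStep x) s).Nodup := by
  intro is
  induction is with
  | nil => intro s hs; exact hs
  | cons i is ih =>
    intro s hs
    refine ih _ ?_
    unfold sStep
    split
    · rename_i hc
      have hnm : i ∉ s := by
        intro hm
        exact hc.2 (by simpa [PySem.Set.contains, List.contains_iff_mem] using hm)
      rw [← List.concat_eq_append]
      exact List.Nodup.concat hnm hs
    · exact hs

lemma nodup_sLevel : ∀ (q : List Int) (s : List Int), s.Nodup → (sLevel q s).Nodup := by
  intro q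
  induction q with
  | nil => intro s hs; exact hs
  | cons x q ih => intro s hs; exact ih _ (nodup_foldl_sStep x _ s hs)

lemma closure_foldl_sStep (x : Int) : ∀ (is : List Int) (s : List Int) (i : Int),
    i ∈ is → PySem.Int.mod x i = 1 → i ∈ is.foldl (sStep x) s := by
  intro is
  induction is with
  | nil => intro s i h; exact absurd h (List.not_mem_nil)
  | cons j is ih =>
    intro s i hmem hmod
    rcases List.mem_cons.mp hmem with h | h
    · subst h
      refine (prefix_foldl_sStep x is (sStep x s i)).subset ?_
      unfold sStep
      by_cases hc : PySem.Int.mod x i = 1 ∧ ¬ (PySem.Set.contains s i = true)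
      · rw [if_pos hc]; simp
      · rw [if_neg hc]
        have : PySem.Set.contains s i = true := by
          by_contra hnc
          exact hc ⟨hmod, hnc⟩
        simpa [PySem.Set.contains, List.contains_iff_mem] using this
    · exact ih _ i h hmod

lemma closure_sLevel : ∀ (q : List Int) (s : List Int) (x : Int), x ∈ q →
    ∀ i, 2 ≤ i → i < x → PySem.Int.mod x i = 1 → i ∈ sLevel q s := by
  intro q
  induction q with
  | nil => intro s x h; exact absurd h (List.not_mem_nil)
  | cons y q ih =>
    intro s x hmem i h2 hlt hmod
    have hL : sLevel (y :: q) s = sLevel q (sInner y s) := by simp [sLevel, sInner]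
    rw [hL]
    rcases List.mem_cons.mp hmem with h | h
    · subst h
      refine (prefix_sLevel q (sInner x s)).subset ?_
      exact closure_foldl_sStep x _ s i (PySem.List.mem_pyRange_one.mpr ⟨h2, hlt⟩) hmod
    · exact ih _ x h i h2 hlt hmod

lemma bound_foldl_sStep (x : Int) : ∀ (is : List Int) (s : List Int) (y : Int),
    y ∈ is.foldl (sStep x) s → y ∈ s ∨ y ∈ is := by
  intro is
  induction is with
  | nil => intro s y h; exact Or.inl h
  | cons i is ih =>
    intro s y h
    rcases ih _ y h with h' | h'
    · unfold sStep at h'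
      split at h'
      · rcases List.mem_append.mp h' with h'' | h''
        · exact Or.inl h''
        · simp only [List.mem_singleton] at h''
          exact Or.inr (by simp [h''])
      · exact Or.inl h'
    · exact Or.inr (List.mem_cons_of_mem _ h')

lemma bound_sLevel : ∀ (q : List Int) (s : List Int) (y : Int),
    y ∈ sLevel q s → y ∈ s ∨ ∃ x ∈ q, 2 ≤ y ∧ y < x := by
  intro q
  induction q with
  | nil => intro s y h; exact Or.inl h
  | cons x q ih =>
    intro s y h
    have hL : sLevel (x :: q) s = sLevel q (sInner x s) := by simp [sLevel, sInner]
    rw [hL] at h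
    rcases ih _ y h with h' | h'
    · rcases bound_foldl_sStep x _ s y h' with h'' | h''
      · exact Or.inl h''
      · have := PySem.List.mem_pyRange_one.mp h''
        exact Or.inr ⟨x, List.mem_cons_self, this.1, this.2⟩
    · obtain ⟨z, hz, hb⟩ := h'
      exact Or.inr ⟨z, List.mem_cons_of_mem _ hz, hb⟩

-- any nodup list inside {n} ∪ [2, n-1] has at most max(n-1,1) elements
lemma len_bound (n : Int) (s : List Int) (hnd : s.Nodup)
    (hb : ∀ y ∈ s, y = n ∨ (2 ≤ y ∧ y ≤ n - 1)) :
    (s.length : Int) ≤ max (n - 1) 1 := by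
  have hsub : s.toFinset ⊆ insert n (Finset.Icc 2 (n - 1)) := by
    intro y hy
    rcases hb y (List.mem_toFinset.mp hy) with h | h
    · simp [h]
    · exact Finset.mem_insert_of_mem (Finset.mem_Icc.mpr h)
  have hcard := Finset.card_le_card hsub
  have h1 : s.toFinset.card = s.length := List.toFinset_card_of_nodup hnd
  have h2 : (insert n (Finset.Icc 2 (n - 1))).card ≤ (Finset.Icc 2 (n - 1)).card + 1 :=
    Finset.card_insert_le _ _
  have h3 : (Finset.Icc 2 (n - 1)).card = (n - 1 + 1 - 2).toNat := Int.card_Icc 2 (n - 1)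
  rw [h1] at hcard
  omega

-- a nodup set containing n, inside {n} ∪ [2, n-1] and closed under 'i divides x-1, 2 ≤ i < x',
-- is exactly {2, …, n} (resp. {n} for n ≤ 2): its size is max(n-1, 1)
lemma count_closed (n : Int) (s : List Int) (hnd : s.Nodup) (hn : n ∈ s)
    (hb : ∀ y ∈ s, y = n ∨ (2 ≤ y ∧ y ≤ n - 1))
    (hc : ∀ y ∈ s, ∀ i, 2 ≤ i → i < y → PySem.Int.mod y i = 1 → i ∈ s) :
    (s.length : Int) = max (n - 1) 1 := by
  have chain : ∀ d : Nat, ∀ k : Int, k = n - d → 2 ≤ k → k ∈ s := by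
    intro d
    induction d with
    | zero => intro k hk _; simpa [hk] using hn
    | succ d ih =>
      intro k hk h2
      have hk1 : k + 1 = n - d := by omega
      have hmem : k + 1 ∈ s := ih (k + 1) hk1 (by omega)
      have hmod : PySem.Int.mod (k + 1) k = 1 := by
        rw [PySem.Int.mod_eq_emod_of_pos (by omega)]
        rw [show k + 1 = 1 + k * 1 by ring, Int.add_mul_emod_self_left]
        exact Int.emod_eq_of_lt (by omega) (by omega)
      exact hc (k + 1) hmem k h2 (by omega) hmod
  have hset : s.toFinset = insert n (Finset.Icc 2 (n - 1)) := by
    apply Finset.Subset.antisymm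
    · intro y hy
      rcases hb y (List.mem_toFinset.mp hy) with h | h
      · simp [h]
      · exact Finset.mem_insert_of_mem (Finset.mem_Icc.mpr h)
    · intro y hy
      rcases Finset.mem_insert.mp hy with h | h
      · subst h; exact List.mem_toFinset.mpr hn
      · have h' := Finset.mem_Icc.mp h
        exact List.mem_toFinset.mpr (chain (n - y).toNat y (by omega) h'.1)
  have h1 : s.toFinset.card = s.length := List.toFinset_card_of_nodup hnd
  have hnotmem : n ∉ Finset.Icc 2 (n - 1) := by
    intro h
    have := Finset.mem_Icc.mp h
    omega
  have h2 : (insert n (Finset.Icc 2 (n - 1))).card = (Finset.Icc 2 (n - 1)).card + 1 :=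
    Finset.card_insert_of_notMem hnotmem
  have h3 : (Finset.Icc 2 (n - 1)).card = (n - 1 + 1 - 2).toNat := Int.card_Icc 2 (n - 1)
  rw [hset, h2, h3] at h1
  omega

-- loop invariant: the seen list s is 'done ++ queue' with done = s.take k already expanded,
-- res = k, and the fuel leaves room for the at most max(n-1,1) - |s| still-unseen values
lemma pvWhile_inv (n : Int) : ∀ (f : Nat) (s : List Int) (k : Nat) (r : Int),
    s.Nodup → n ∈ s → k ≤ s.length →
    (∀ y ∈ s, y = n ∨ (2 ≤ y ∧ y ≤ n - 1)) →
    (∀ y ∈ s.take k, ∀ i, 2 ≤ i → i < y → PySem.Int.mod y i = 1 → i ∈ s) →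
    r = (k : Int) →
    max (n - 1) 1 + 2 ≤ (f : Int) + (s.length : Int) →
    pvWhile f (s.drop k) s r = max (n - 1) 1 := by
  intro f
  induction f with
  | zero =>
    intro s k r hnd hn hk hb hcl hr hfuel
    exfalso
    have := len_bound n s hnd hb
    simp at hfuel
    omega
  | succ f ih =>
    intro s k r hnd hn hk hb hcl hr hfuel
    by_cases hq : s.drop k = []
    · -- queue empty: loop returns res = k = |s|, and s is fully expanded
      have hk' : k = s.length := by
        have hlen := congrArg List.length hq
        simp at hlen
        omega
      have hfull : ∀ y ∈ s, ∀ i, 2 ≤ i → i < y → PySem.Int.mod y i = 1 → i ∈ s := by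
        intro y hy
        exact hcl y (by rw [hk', List.take_length]; exact hy)
      rw [hq]
      have : pvWhile (f + 1) [] s r = r := by simp [pvWhile]
      rw [this, hr, show (k : Int) = (s.length : Int) by exact_mod_cast congrArg Nat.cast hk']
      exact count_closed n s hnd hn hb hfull
    · -- queue nonempty: one level step
      have hstep : pvWhile (f + 1) (s.drop k) s r =
          pvWhile f ((sLevel (s.drop k) s).drop s.length) (sLevel (s.drop k) s)
            (r + ((s.drop k).length : Int)) := by
        simp only [pvWhile, List.isEmpty_iff, hq, pvLevel_shape]
        simp
      set F := sLevel (s.drop k) s with hF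
      have hpre : s <+: F := prefix_sLevel _ s
      have hlen : s.length ≤ F.length := hpre.length_le
      have hFnd : F.Nodup := nodup_sLevel _ s hnd
      have hr' : r + ((s.drop k).length : Int) = (s.length : Int) := by
        rw [List.length_drop]
        omega
      have hFb : ∀ y ∈ F, y = n ∨ (2 ≤ y ∧ y ≤ n - 1) := by
        intro y hy
        rcases bound_sLevel _ s y hy with h | h
        · exact hb y h
        · obtain ⟨x, hx, h2, hlt⟩ := h
          have hxb := hb x (List.drop_subset k s hx)
          right
          constructor
          · exact h2
          · rcases hxb with h' | h' <;> omega
      have htake : F.take s.length = s := by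
        obtain ⟨u, hu⟩ := hpre
        rw [← hu, List.take_left]
      have hFcl : ∀ y ∈ F.take s.length, ∀ i, 2 ≤ i → i < y → PySem.Int.mod y i = 1 → i ∈ F := by
        rw [htake]
        intro y hy i h2 hlt hmod
        have hsplit : y ∈ s.take k ∨ y ∈ s.drop k := by
          have hy' : y ∈ s.take k ++ s.drop k := by rw [List.take_append_drop]; exact hy
          exact List.mem_append.mp hy'
        rcases hsplit with h | h
        · exact hpre.subset (hcl y h i h2 hlt hmod)
        · exact closure_sLevel _ s y h i h2 hlt hmod
      by_cases hgrow : F.length = s.length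
      · -- nothing new: tmp = [], next iteration exits
        have hFs : F = s := (hpre.eq_of_length (by omega)).symm
        have hdrop : F.drop s.length = [] := by
          rw [hFs]; simp
        rw [hstep, hdrop]
        obtain ⟨f', rfl⟩ : ∃ f', f = f' + 1 := by
          have := len_bound n s hnd hb
          have hf : 1 ≤ f := by
            simp at hfuel
            omega
          exact ⟨f - 1, by omega⟩
        have : pvWhile (f' + 1) [] F (r + ((s.drop k).length : Int)) =
            r + ((s.drop k).length : Int) := by simp [pvWhile]
        rw [this, hr']
        have hfull : ∀ y ∈ s, ∀ i, 2 ≤ i → i < y → PySem.Int.mod y i = 1 → i ∈ s := by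
          intro y hy
          have := hFcl y (by rw [htake]; exact hy)
          rw [hFs] at this
          exact this
        exact count_closed n s hnd hn hb hfull
      · -- at least one new value was seen
        have hlt' : s.length < F.length := by omega
        rw [hstep]
        rw [show r + ((s.drop k).length : Int) = (s.length : Int) from hr']
        rw [← hr']
        refine ih F s.length (r + ((s.drop k).length : Int)) hFnd (hpre.subset hn)
          (by omega) hFb hFcl hr' ?_
        have : (s.length : Int) + 1 ≤ (F.length : Int) := by exact_mod_cast hlt'
        push_cast at hfuel ⊢
        omega

-- ===== VERDICT (by name: the statement is the Claim_ definition above) =====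
theorem distinctIntegers_spec : Claim_equal_distinctIntegers := by
  intro n _
  unfold Spec_distinctIntegers distinctIntegers distinctIntegers_alt
  have hinit : PySem.Set.ofList [n] = [n] := rfl
  rw [hinit]
  have h0 : ([n] : List Int).drop 0 = [n] := rfl
  rw [← h0]
  refine pvWhile_inv n (n.toNat + 2) [n] 0 0 (by simp) (by simp) (by simp)
    (by intro y hy; simp at hy; exact Or.inl hy) (by simp) rfl ?_
  have h1 : max (n - 1) 1 ≤ (n.toNat : Int) + 1 := max_le (by omega) (by omega)
  simp only [List.length_cons, List.length_nil]
  push_cast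
  generalize hM : max (n - 1) 1 = M at h1 ⊢
  omega
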